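-- pv_equiv track=rewrite | github.com/gr-rahimi/APSim | utility.py | generate_diagonal_route
-- ===== SOURCE A (Python) =====
-- def generate_diagonal_route(size, diagonal_width):
--     routing_matrix = [[0 for _ in range(size)] for _ in range(size)]
--
--     for i in range(size):
--         routing_matrix[i][i] = 1
--         for j in range(1, diagonal_width + 1):
--             if i - j >= 0:
--                 routing_matrix[i][i - j] = 1
--
--             if i + j < size:
--                 routing_matrix[i][i + j] = 1
--
--     return routing_matrix
-- ===== SOURCE B (Python) =====
-- def generate_diagonal_route(size, diagonal_width):
--     w = max(diagonal_width, 0)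
--     return [[1 if abs(i - j) <= w else 0 for j in range(size)]
--             for i in range(size)]
-- ===== Notes on version B (the rewrite author's own statement) =====
-- stated objective: simpler
-- what changed: Replaces the allocate-zeros-then-walk-the-band mutation (with two bound-checked writes per offset) by a closed-form comprehension that computes each cell directly from the distance test abs(i-j) <= max(diagonal_width,0).
import Mathlib
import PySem

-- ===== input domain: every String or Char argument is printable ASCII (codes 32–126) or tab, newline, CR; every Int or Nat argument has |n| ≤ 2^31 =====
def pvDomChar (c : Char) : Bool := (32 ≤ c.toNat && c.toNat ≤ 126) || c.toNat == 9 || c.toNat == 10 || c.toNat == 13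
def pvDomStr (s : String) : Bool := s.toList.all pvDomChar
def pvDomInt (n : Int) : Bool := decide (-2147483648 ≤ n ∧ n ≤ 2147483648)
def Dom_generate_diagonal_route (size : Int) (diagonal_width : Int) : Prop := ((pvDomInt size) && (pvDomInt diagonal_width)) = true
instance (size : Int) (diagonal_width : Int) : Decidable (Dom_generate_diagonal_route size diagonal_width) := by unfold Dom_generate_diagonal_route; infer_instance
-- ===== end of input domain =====

-- B replaces A's allocate-zeros-then-fill-the-band mutation by a closed-form per-cell
-- distance test abs(i-j) <= max(diagonal_width,0); objective: simpler.


-- ===== PORT A =====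
-- matrix = [[0]*size]*size built elementwise; then for each i set the diagonal and
-- walk offsets j = 1..diagonal_width with the two bound-checked writes, mutating row i
-- (Python's routing_matrix[i][x] = 1 is List.modify at row i with List.set at column x).
def generate_diagonal_route (size : Int) (diagonal_width : Int) : List (List Int) :=
  let routing_matrix :=
    (PySem.List.pyRange 0 size 1).map (fun _ =>
      (PySem.List.pyRange 0 size 1).map (fun _ => (0 : Int)))
  (PySem.List.pyRange 0 size 1).foldl
    (fun m i =>
      let m1 := m.modify i.toNat (fun r => r.set i.toNat 1)
      (PySem.List.pyRange 1 (diagonal_width + 1) 1).foldl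
        (fun m2 j =>
          let m3 := if 0 ≤ i - j then m2.modify i.toNat (fun r => r.set (i - j).toNat 1) else m2
          if i + j < size then m3.modify i.toNat (fun r => r.set (i + j).toNat 1) else m3)
        m1)
    routing_matrix

-- ===== PORT B =====
def generate_diagonal_route_alt (size : Int) (diagonal_width : Int) : List (List Int) :=
  let w := max diagonal_width 0
  (PySem.List.pyRange 0 size 1).map (fun i =>
    (PySem.List.pyRange 0 size 1).map (fun j => if |i - j| ≤ w then (1 : Int) else 0))

-- ===== PRECONDITION & SPEC =====
def Spec_generate_diagonal_route (size : Int) (diagonal_width : Int) (out : List (List Int)) : Prop := out = generate_diagonal_route_alt size diagonal_width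
instance (size : Int) (diagonal_width : Int) (out : List (List Int)) : Decidable (Spec_generate_diagonal_route size diagonal_width out) := by unfold Spec_generate_diagonal_route; infer_instance

-- ===== CLAIM (what is proved, stated in full; the proofs are below) =====
def Claim_equal_generate_diagonal_route : Prop := ∀ (size : Int) (diagonal_width : Int), Dom_generate_diagonal_route size diagonal_width → Spec_generate_diagonal_route size diagonal_width (generate_diagonal_route size diagonal_width)

-- ===== LEMMAS AND PROOFS =====

theorem pv_modify_modify {α : Type} (m : List α) (k : Nat) (f g : α → α) :
    (m.modify k f).modify k g = m.modify k (fun r => g (f r)) := by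
  apply List.ext_getElem?
  intro i
  simp only [List.getElem?_modify]
  cases m[i]? with
  | none => rfl
  | some a => by_cases h : k = i <;> simp [h]

theorem pv_modify_id {α : Type} (m : List α) (k : Nat) :
    m.modify k (fun r => r) = m := by
  apply List.ext_getElem?
  intro i
  simp [List.getElem?_modify]

-- the inner-loop body of A is one List.modify at row i with a row-level function
theorem pv_step_eq {α : Type} (m : List α) (k : Nat) (c₁ c₂ : Prop) [Decidable c₁] [Decidable c₂]
    (g₁ g₂ : α → α) :
    (let m3 := if c₁ then m.modify k g₁ else m
     if c₂ then m3.modify k g₂ else m3)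
    = m.modify k (fun r => let r1 := if c₁ then g₁ r else r; if c₂ then g₂ r1 else r1) := by
  split_ifs <;> simp [pv_modify_modify, pv_modify_id]

-- a fold of modifies at one fixed row is one modify with the folded row function
theorem pv_foldl_modify {α β : Type} (js : List β) (m : List α) (k : Nat)
    (st : β → α → α) (f : α → α) :
    js.foldl (fun m j => m.modify k (st j)) (m.modify k f)
    = m.modify k (fun r => js.foldl (fun r j => st j r) (f r)) := by
  induction js generalizing f with
  | nil => rfl
  | cons j js ih =>
    simp only [List.foldl_cons, pv_modify_modify]
    exact ih (fun r => st j (f r))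

-- getElem? through a fold of modifies indexed by an increasing integer range
theorem pv_outer_get (b : Int) (F : Int → List Int → List Int) :
    ∀ (n : Nat) (a : Int) (m : List (List Int)) (k : Nat), 0 ≤ a → (b - a).toNat = n →
    ((PySem.List.pyRange a b 1).foldl (fun m i => m.modify i.toNat (F i)) m)[k]?
      = if a ≤ (k : Int) ∧ (k : Int) < b then (m[k]?).map (F k) else m[k]? := by
  intro n
  induction n with
  | zero =>
    intro a m k ha hn
    have hab : b ≤ a := by omega
    have hc : ¬ (a ≤ (k : Int) ∧ (k : Int) < b) := by omega
    rw [PySem.List.pyRange_one_eq_nil hab]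
    simp [hc]
  | succ n ih =>
    intro a m k ha hn
    have hab : a < b := by omega
    rw [PySem.List.pyRange_one_cons hab, List.foldl_cons,
        ih (a + 1) _ k (by omega) (by omega), List.getElem?_modify]
    by_cases hk : (k : Int) = a
    · have h1 : a.toNat = k := by omega
      have h2 : ¬ (a + 1 ≤ (k : Int) ∧ (k : Int) < b) := by omega
      have h3 : a ≤ (k : Int) ∧ (k : Int) < b := by omega
      rw [if_neg h2, if_pos h3]
      cases m[k]? with
      | none => rfl
      | some r =>
        show some (if a.toNat = k then F a r else r) = some (F (k : Int) r)
        rw [if_pos h1, hk]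
    · have h1 : ¬ (a.toNat = k) := by omega
      have h2 : (a + 1 ≤ (k : Int) ∧ (k : Int) < b) ↔ (a ≤ (k : Int) ∧ (k : Int) < b) := by omega
      have hX : ((fun r => if a.toNat = k then F a r else r) <$> m[k]?) = m[k]? := by
        cases m[k]? with
        | none => rfl
        | some r => show some (if a.toNat = k then F a r else r) = some r; rw [if_neg h1]
      rw [hX, if_congr h2 rfl rfl]

-- inner loop: cell k of the row after the band walk
theorem pv_inner_get (i size : Int) (hi : 0 ≤ i) (hiS : i < size) :
    ∀ (js : List Int) (r : List Int) (k : Nat), (∀ j ∈ js, 1 ≤ j) → r.length = size.toNat →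
    ((js.foldl
        (fun r j =>
          let r1 := if 0 ≤ i - j then r.set (i - j).toNat 1 else r
          if i + j < size then r1.set (i + j).toNat 1 else r1) r)[k]?)
      = if (∃ j ∈ js, (i - j = (k : Int)) ∨ (i + j = (k : Int) ∧ i + j < size))
        then some 1 else r[k]? := by
  intro js
  induction js with
  | nil => intro r k _ _; simp
  | cons j js ih =>
    intro r k hjs hr
    have hj : 1 ≤ j := hjs j (List.mem_cons_self ..)
    rw [List.foldl_cons]
    have hlen : ((fun r j =>
          let r1 := if 0 ≤ i - j then r.set (i - j).toNat 1 else r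
          if i + j < size then r1.set (i + j).toNat 1 else r1) r j).length = size.toNat := by
      show (if i + j < size
            then (if 0 ≤ i - j then r.set (i - j).toNat 1 else r).set (i + j).toNat 1
            else if 0 ≤ i - j then r.set (i - j).toNat 1 else r).length = size.toNat
      split_ifs <;> simp [hr]
    rw [ih _ k (fun x hx => hjs x (List.mem_cons_of_mem _ hx)) hlen]
    by_cases hrest : ∃ x ∈ js, (i - x = (k : Int)) ∨ (i + x = (k : Int) ∧ i + x < size)
    · rw [if_pos hrest, if_pos (by
        rcases hrest with ⟨x, hx, h⟩
        exact ⟨x, List.mem_cons_of_mem _ hx, h⟩)]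
    · rw [if_neg hrest]
      have hcond : (∃ x ∈ j :: js, (i - x = (k : Int)) ∨ (i + x = (k : Int) ∧ i + x < size))
          ↔ ((i - j = (k : Int)) ∨ (i + j = (k : Int) ∧ i + j < size)) := by
        constructor
        · rintro ⟨x, hx, h⟩
          rcases List.mem_cons.mp hx with rfl | hx'
          · exact h
          · exact absurd ⟨x, hx', h⟩ hrest
        · intro h; exact ⟨j, List.mem_cons_self .., h⟩
      rw [if_congr hcond rfl rfl]
      clear hlen hcond hrest ih hjs
      show (if i + j < size
            then (if 0 ≤ i - j then r.set (i - j).toNat 1 else r).set (i + j).toNat 1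
            else if 0 ≤ i - j then r.set (i - j).toNat 1 else r)[k]?
          = if (i - j = (k : Int)) ∨ (i + j = (k : Int) ∧ i + j < size) then some 1 else r[k]?
      split_ifs with h1 h2 <;>
        (try simp only [List.getElem?_set, List.length_set, hr]) <;>
        (try split_ifs) <;> first | rfl | omega

-- the transformed row i equals B's closed-form row
theorem pv_row_eq (size diagonal_width i : Int) (hi : 0 ≤ i) (hiS : i < size) :
    (PySem.List.pyRange 1 (diagonal_width + 1) 1).foldl
      (fun r j =>
        let r1 := if 0 ≤ i - j then r.set (i - j).toNat 1 else r
        if i + j < size then r1.set (i + j).toNat 1 else r1)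
      (((PySem.List.pyRange 0 size 1).map (fun _ => (0 : Int))).set i.toNat 1)
    = (PySem.List.pyRange 0 size 1).map
        (fun j => if |i - j| ≤ max diagonal_width 0 then (1 : Int) else 0) := by
  apply List.ext_getElem?
  intro k
  rw [pv_inner_get i size hi hiS _ _ k
        (fun j hj => (PySem.List.mem_pyRange_one.mp hj).1)
        (by simp [PySem.List.length_pyRange_one])]
  rw [List.getElem?_map, PySem.List.getElem?_pyRange_one]
  by_cases hk : k < (size - 0).toNat
  · rw [if_pos hk]
    by_cases hC : ∃ j ∈ PySem.List.pyRange 1 (diagonal_width + 1) 1,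
        (i - j = (k : Int)) ∨ (i + j = (k : Int) ∧ i + j < size)
    · rw [if_pos hC]
      obtain ⟨j, hj, h⟩ := hC
      have hjb := PySem.List.mem_pyRange_one.mp hj
      have hmax1 : j ≤ max diagonal_width 0 := le_trans (by omega) (le_max_left _ _)
      have hmax0 : (0 : Int) ≤ max diagonal_width 0 := le_max_right _ _
      have habs : |i - (0 + (k : Int))| ≤ max diagonal_width 0 := by rw [abs_le]; omega
      rw [Option.map_some, if_pos habs]
    · rw [if_neg hC, List.getElem?_set]
      by_cases hik : i.toNat = k
      · have hk2 : (k : Int) = i := by omega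
        have hmax0 : (0 : Int) ≤ max diagonal_width 0 := le_max_right _ _
        have habs : |i - (0 + (k : Int))| ≤ max diagonal_width 0 := by rw [abs_le]; omega
        rw [if_pos hik, if_pos (by simp [PySem.List.length_pyRange_one]; omega),
            Option.map_some, if_pos habs]
      · have habs' : ¬ (|i - (0 + (k : Int))| ≤ max diagonal_width 0) := by
          intro habs
          rcases abs_le.mp habs with ⟨hl, hr2⟩
          rcases max_choice diagonal_width 0 with hm | hm
          all_goals {
            apply hC
            by_cases hgt : (k : Int) < i
            · exact ⟨i - (k : Int), PySem.List.mem_pyRange_one.mpr (by omega), Or.inl (by omega)⟩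
            · exact ⟨(k : Int) - i, PySem.List.mem_pyRange_one.mpr (by omega), Or.inr (by omega)⟩ }
        rw [if_neg hik, List.getElem?_map, PySem.List.getElem?_pyRange_one, if_pos hk,
            Option.map_some, Option.map_some, if_neg habs']
  · rw [if_neg hk, if_neg (by
      rintro ⟨j, hj, h⟩
      have hjb := PySem.List.mem_pyRange_one.mp hj
      omega), List.getElem?_set, if_neg (by
        intro hik
        have : i.toNat < (size - 0).toNat := by omega
        omega), List.getElem?_map, PySem.List.getElem?_pyRange_one, if_neg hk]
    rfl

-- ===== VERDICT (by name: the statement is the Claim_ definition above) =====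
theorem generate_diagonal_route_spec : Claim_equal_generate_diagonal_route := by
  intro size diagonal_width _
  show generate_diagonal_route size diagonal_width = generate_diagonal_route_alt size diagonal_width
  unfold generate_diagonal_route generate_diagonal_route_alt
  have hbody : (fun (m : List (List Int)) (i : Int) =>
      let m1 := m.modify i.toNat (fun r => r.set i.toNat 1)
      (PySem.List.pyRange 1 (diagonal_width + 1) 1).foldl
        (fun m2 j =>
          let m3 := if 0 ≤ i - j then m2.modify i.toNat (fun r => r.set (i - j).toNat 1) else m2
          if i + j < size then m3.modify i.toNat (fun r => r.set (i + j).toNat 1) else m3)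
        m1)
    = fun m i => m.modify i.toNat (fun r =>
        (PySem.List.pyRange 1 (diagonal_width + 1) 1).foldl
          (fun r j =>
            let r1 := if 0 ≤ i - j then r.set (i - j).toNat 1 else r
            if i + j < size then r1.set (i + j).toNat 1 else r1)
          (r.set i.toNat 1)) := by
    funext m i
    show (PySem.List.pyRange 1 (diagonal_width + 1) 1).foldl _
        (m.modify i.toNat (fun r => r.set i.toNat 1)) = _
    have hstep : (fun (m2 : List (List Int)) (j : Int) =>
        let m3 := if 0 ≤ i - j then m2.modify i.toNat (fun r => r.set (i - j).toNat 1) else m2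
        if i + j < size then m3.modify i.toNat (fun r => r.set (i + j).toNat 1) else m3)
      = fun m2 j => m2.modify i.toNat (fun r =>
          let r1 := if 0 ≤ i - j then r.set (i - j).toNat 1 else r
          if i + j < size then r1.set (i + j).toNat 1 else r1) := by
      funext m2 j
      exact pv_step_eq m2 i.toNat _ _ _ _
    rw [hstep]
    exact pv_foldl_modify _ m i.toNat _ _
  show ((PySem.List.pyRange 0 size 1).foldl _
      ((PySem.List.pyRange 0 size 1).map (fun _ =>
        (PySem.List.pyRange 0 size 1).map (fun _ => (0 : Int))))) = _
  rw [hbody]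
  apply List.ext_getElem?
  intro k
  rw [pv_outer_get size _ (size - 0).toNat 0 _ k le_rfl rfl]
  by_cases hk : k < (size - 0).toNat
  · rw [if_pos ⟨by omega, by omega⟩, List.getElem?_map, PySem.List.getElem?_pyRange_one,
       if_pos hk, List.getElem?_map, PySem.List.getElem?_pyRange_one, if_pos hk,
       Option.map_some, Option.map_some]
    simp only [zero_add]
    exact congrArg some (pv_row_eq size diagonal_width (k : Int) (by positivity) (by omega))
  · rw [if_neg (by omega), List.getElem?_map, PySem.List.getElem?_pyRange_one, if_neg hk,
       List.getElem?_map, PySem.List.getElem?_pyRange_one, if_neg hk]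
    rfl
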